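-- pv_equiv track=rewrite | github.com/danivm1/codeWars | python/how_many_numbers_iii.py | check
-- ===== SOURCE A (Python) =====
-- def check(x, sum_dig):
--     lst = [int(i) for i in str(x)]
--
--     s = lst[0]
--
--     for i in range(1, len(lst)):
--         if lst[i] < lst[i-1]: return False
--
--         s += lst[i]
--
--     if s != sum_dig: return False
--
--     return True
-- ===== SOURCE B (Python) =====
-- def check(x, sum_dig):
--     digits = [int(c) for c in str(x)]
--     return digits == sorted(digits) and sum(digits) == sum_dig
-- ===== Notes on version B (the rewrite author's own statement) =====
-- stated objective: idiomatic
-- what changed: Replaces A's hand-written single scan (non-decreasing check with early return plus running sum) by a sort-based monotonicity test (digits == sorted(digits)) and a separate sum(digits) comparison.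
import Mathlib
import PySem

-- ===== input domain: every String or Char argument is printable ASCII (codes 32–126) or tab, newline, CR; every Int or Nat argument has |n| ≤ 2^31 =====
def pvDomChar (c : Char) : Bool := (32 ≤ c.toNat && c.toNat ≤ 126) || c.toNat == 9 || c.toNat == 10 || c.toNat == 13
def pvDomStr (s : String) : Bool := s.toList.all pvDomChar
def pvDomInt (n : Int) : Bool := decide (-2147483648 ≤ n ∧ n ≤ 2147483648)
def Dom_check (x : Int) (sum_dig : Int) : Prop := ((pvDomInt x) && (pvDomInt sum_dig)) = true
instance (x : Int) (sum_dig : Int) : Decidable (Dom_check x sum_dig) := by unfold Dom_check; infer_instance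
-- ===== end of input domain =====

-- B replaces A's single hand-written non-decreasing-and-sum scan by the idiomatic
-- digits == sorted(digits) test plus a separate sum(digits) comparison.

-- ===== PORT A =====
-- int(c) for a single character; exact on digit characters (Pre_ excludes x < 0,
-- where Python's int('-') raises ValueError; there the primitive returns none).
def pvDigit (c : Char) : Int := (PySem.Int.ofChars? [c]).getD 0

-- the 'for i in range(1, len(lst))' loop with its early 'return False';
-- none = early False, some s = final running sum
def checkLoopA : Int → List Int → Int → Option Int
  | _, [], s => some s
  | prev, d :: t, s => if d < prev then none else checkLoopA d t (s + d)

def check (x : Int) (sum_dig : Int) : Bool :=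
  let lst := (PySem.Int.toChars x).map pvDigit
  let s := (PySem.List.pyGet? lst 0).getD 0   -- lst is nonempty (str(x) ≠ ''), so lst[0] never raises
  match checkLoopA (lst.headD 0) lst.tail s with
  | none => false
  | some s' => if s' ≠ sum_dig then false else true

-- ===== PORT B =====
def check_alt (x : Int) (sum_dig : Int) : Bool :=
  let digits := (PySem.Int.toChars x).map pvDigit
  (digits == PySem.List.sorted digits (fun d => d) false) && (digits.sum == sum_dig)

-- ===== PRECONDITION & SPEC =====
-- Pre_ excludes x < 0: there str(x) starts with '-' and int('-') raises ValueError in A (and in B).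
def Pre_check (x : Int) (sum_dig : Int) : Prop := 0 ≤ x
instance (x : Int) (sum_dig : Int) : Decidable (Pre_check x sum_dig) := by unfold Pre_check; infer_instance
def pvWitness_check : Int × Int := (1234, 10)

def Spec_check (x : Int) (sum_dig : Int) (out : Bool) : Prop := out = check_alt x sum_dig
instance (x : Int) (sum_dig : Int) (out : Bool) : Decidable (Spec_check x sum_dig out) := by unfold Spec_check; infer_instance

-- ===== CLAIM (what is proved, stated in full; the proofs are below) =====
def Claim_equal_check : Prop := ∀ (x : Int) (sum_dig : Int), Dom_check x sum_dig → Pre_check x sum_dig → Spec_check x sum_dig (check x sum_dig)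

-- ===== LEMMAS AND PROOFS =====

def chainLE : Int → List Int → Bool
  | _, [] => true
  | prev, d :: t => decide (prev ≤ d) && chainLE d t

theorem checkLoopA_eq (rest : List Int) : ∀ (prev s : Int),
    checkLoopA prev rest s =
      if chainLE prev rest then some (s + rest.sum) else none := by
  induction rest with
  | nil => intro prev s; simp [checkLoopA, chainLE]
  | cons d t ih =>
    intro prev s
    simp only [checkLoopA, chainLE, List.sum_cons, ih]
    by_cases h1 : d < prev
    · simp [h1, not_le.mpr h1]
    · have h1' : prev ≤ d := not_lt.mp h1
      by_cases h2 : chainLE d t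
      · simp [h1, h1', h2]; ring
      · simp [h1, h1', h2]

theorem chainLE_iff (rest : List Int) : ∀ (prev : Int),
    chainLE prev rest = true ↔ (prev :: rest).Pairwise (· ≤ ·) := by
  induction rest with
  | nil => intro prev; simp [chainLE]
  | cons d t ih =>
    intro prev
    simp only [chainLE, Bool.and_eq_true, decide_eq_true_eq, ih, List.pairwise_cons]
    constructor
    · rintro ⟨hpd, hdt, hp⟩
      refine ⟨?_, hdt, hp⟩
      intro a ha
      rcases List.mem_cons.mp ha with h | h
      · exact h ▸ hpd
      · exact le_trans hpd (hdt a h)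
    · rintro ⟨hall, hdt, hp⟩
      exact ⟨hall d (by simp), hdt, hp⟩

theorem sorted_self_iff (D : List Int) :
    (D = PySem.List.sorted D (fun d => d) false) ↔ D.Pairwise (· ≤ ·) := by
  constructor
  · intro h
    have := PySem.List.sorted_pairwise (xs := D) (key := fun d : Int => d)
    rw [← h] at this
    simpa using this
  · intro h
    exact (PySem.List.sorted_eq_self_of_pairwise (xs := D) (key := fun d : Int => d) (by simpa using h)).symm

theorem check_eq_alt (x sum_dig : Int) : check x sum_dig = check_alt x sum_dig := by
  unfold check check_alt
  cases hD : (PySem.Int.toChars x).map pvDigit with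
  | nil =>
    simp [checkLoopA, PySem.List.pyGet?, PySem.List.pyIdx?, PySem.List.sorted]
    by_cases h : (0 : Int) = sum_dig <;> simp [h]
  | cons h t =>
    simp only [List.headD_cons, List.tail_cons, checkLoopA_eq]
    have hget : ((PySem.List.pyGet? (h :: t) 0).getD 0) = h := by
      simp [PySem.List.pyGet?, PySem.List.pyIdx?]
    rw [hget]
    by_cases hc : chainLE h t
    · have hp : (h :: t).Pairwise (· ≤ ·) := (chainLE_iff t h).mp hc
      have hs : (h :: t) = PySem.List.sorted (h :: t) (fun d => d) false :=
        (sorted_self_iff (h :: t)).mpr hp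
      simp only [if_pos hc, ← hs]
      by_cases he : h + t.sum = sum_dig
      · simp [he]
      · simp [he]
    · have hp : ¬ (h :: t).Pairwise (· ≤ ·) := fun hp => hc ((chainLE_iff t h).mpr hp)
      have hs : ¬ ((h :: t) = PySem.List.sorted (h :: t) (fun d => d) false) :=
        fun e => hp ((sorted_self_iff (h :: t)).mp e)
      simp [if_neg hc, hs]

-- ===== VERDICT (by name: the statement is the Claim_ definition above) =====
theorem check_spec : Claim_equal_check := by
  intro x sum_dig _ _
  unfold Spec_check
  exact check_eq_alt x sum_dig
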